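-- pv_equiv track=rewrite | github.com/nikel4610/Algorithm_Note_for_me | list.py | solution
-- ===== SOURCE A (Python) =====
-- def solution(s):
--     answer = 0
--     stack = []
--     for i in s:
--         if not stack:
--             stack.append(i)
--         else:
--             if stack[-1] == i:
--                 stack.pop()
--             else:
--                 stack.append(i)
--     if not stack:
--         answer = 1
--     return answer
-- ===== SOURCE B (Python) =====
-- def solution(s):
--     t = list(s)
--     changed = True
--     while changed:
--         changed = False
--         for i in range(len(t) - 1):
--             if t[i] == t[i + 1]:
--                 del t[i:i + 2]
--                 changed = True
--                 break
--     return 1 if not t else 0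
-- ===== Notes on version B (the rewrite author's own statement) =====
-- stated objective: alternative
-- what changed: Replaces the single stack pass with repeated find-first-adjacent-equal-pair-and-delete scans until no pair remains, returning 1 iff the residue is empty; equivalence rests on confluence of adjacent-pair removal.
import Mathlib
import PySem

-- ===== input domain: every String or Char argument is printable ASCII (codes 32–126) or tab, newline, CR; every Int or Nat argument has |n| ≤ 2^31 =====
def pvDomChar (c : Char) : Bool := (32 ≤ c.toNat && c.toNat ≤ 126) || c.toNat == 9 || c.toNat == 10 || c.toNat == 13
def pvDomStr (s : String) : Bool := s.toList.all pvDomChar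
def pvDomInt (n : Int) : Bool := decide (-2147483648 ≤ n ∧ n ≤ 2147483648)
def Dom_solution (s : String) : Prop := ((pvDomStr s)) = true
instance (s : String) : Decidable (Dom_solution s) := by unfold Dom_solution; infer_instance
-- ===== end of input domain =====

-- B replaces the stack pass with repeated removal of the first adjacent equal pair (alternative decomposition, same result).


-- ===== PORT A =====
-- stack with head = top (Python's stack[-1] / append / pop at the end)
def pvStepA (stack : List Char) (i : Char) : List Char :=
  if stack = [] then [i]
  else if stack.head? = some i then stack.tail
  else i :: stack

def solution (s : String) : Int :=
  let stack := s.toList.foldl pvStepA []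
  if stack = [] then 1 else 0

-- ===== PORT B =====
-- the inner for-loop of Source B: find the first adjacent equal pair and delete it (none = no pair found)
def pvRemovePair : List Char → Option (List Char)
  | a :: b :: r => if a = b then some r else (pvRemovePair (b :: r)).map (a :: ·)
  | _ => none

theorem pvRemovePair_length : ∀ (l l' : List Char), pvRemovePair l = some l' → l'.length + 2 = l.length := by
  intro l
  induction l with
  | nil => intro l' h; simp [pvRemovePair] at h
  | cons a t ih =>
    match t with
    | [] => intro l' h0; simp [pvRemovePair] at h0
    | b :: r =>
      intro l' h
      simp only [pvRemovePair] at h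
      split at h
      · simp_all
      · cases hr : pvRemovePair (b :: r) with
        | none => simp [hr] at h
        | some l'' =>
          simp [hr] at h
          have hlen := ih l'' hr
          subst h
          simp only [List.length_cons] at hlen ⊢
          omega

-- the outer while-loop of Source B
def pvReduce (l : List Char) : List Char :=
  match h : pvRemovePair l with
  | some l' => pvReduce l'
  | none => l
termination_by l.length
decreasing_by have := pvRemovePair_length l l' h; omega

def solution_alt (s : String) : Int :=
  if pvReduce s.toList = [] then 1 else 0

-- ===== PRECONDITION & SPEC =====
def Spec_solution (s : String) (out : Int) : Prop := out = solution_alt s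
instance (s : String) (out : Int) : Decidable (Spec_solution s out) := by unfold Spec_solution; infer_instance

-- ===== CLAIM (what is proved, stated in full; the proofs are below) =====
def Claim_equal_solution : Prop := ∀ (s : String), Dom_solution s → Spec_solution s (solution s)

-- ===== LEMMAS AND PROOFS =====

theorem pvReduce_some {l l' : List Char} (h : pvRemovePair l = some l') :
    pvReduce l = pvReduce l' := by
  rw [pvReduce]
  split
  · next l2 h2 => rw [h] at h2; cases h2; rfl
  · next h2 => rw [h] at h2; cases h2

theorem pvReduce_of_none {l : List Char} (h : pvRemovePair l = none) : pvReduce l = l := by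
  rw [pvReduce]
  split
  · next l2 h2 => rw [h] at h2; cases h2
  · rfl


-- the stack never holds two equal adjacent characters
theorem pvStepA_chain (st : List Char) (c : Char) (h : st.IsChain (· ≠ ·)) :
    (pvStepA st c).IsChain (· ≠ ·) := by
  unfold pvStepA
  split
  · exact List.isChain_singleton c
  · split
    · exact h.tail
    · next hne htop =>
      cases st with
      | nil => simp_all
      | cons a t =>
        refine List.isChain_cons.mpr ⟨?_, h⟩
        intro y hy
        simp at hy htop
        subst hy
        exact fun hc => htop hc.symm

-- pushing the same character twice onto a chain-free stack is the identity
theorem pvStepA_twice (st : List Char) (c : Char) (h : st.IsChain (· ≠ ·)) :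
    pvStepA (pvStepA st c) c = st := by
  cases st with
  | nil => simp [pvStepA]
  | cons a t =>
    by_cases hac : a = c
    · subst hac
      simp only [pvStepA]
      simp only [List.head?_cons, reduceCtorEq, if_false, List.tail_cons]
      cases t with
      | nil => simp
      | cons b t2 =>
        have hab : a ≠ b := h.rel_head
        simp [Ne.symm hab]
    · simp [pvStepA, hac]

-- removing the first adjacent pair does not change the final stack
theorem pvRemovePair_foldl : ∀ (l l' st : List Char), st.IsChain (· ≠ ·) →
    pvRemovePair l = some l' → l.foldl pvStepA st = l'.foldl pvStepA st := by
  intro l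
  induction l with
  | nil => intro l' st _ h; simp [pvRemovePair] at h
  | cons a t ih =>
    match t with
    | [] => intro l' st _ h; simp [pvRemovePair] at h
    | b :: r =>
      intro l' st hst h
      simp only [pvRemovePair] at h
      split at h
      · next hab =>
        subst hab
        simp at h
        subst h
        simp [List.foldl_cons, pvStepA_twice st a hst]
      · cases hr : pvRemovePair (b :: r) with
        | none => simp [hr] at h
        | some l'' =>
          simp [hr] at h
          subst h
          simp only [List.foldl_cons]
          exact ih l'' (pvStepA st a) (pvStepA_chain st a hst) hr

theorem pvReduce_foldl (l : List Char) :
    l.foldl pvStepA [] = (pvReduce l).foldl pvStepA [] := by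
  induction l using pvReduce.induct with
  | case1 l l' h ih =>
    rw [pvRemovePair_foldl l l' [] List.isChain_nil h, ih, pvReduce_some h]
  | case2 l h =>
    rw [pvReduce_of_none h]

theorem pvRemovePair_none_chain : ∀ (l : List Char), pvRemovePair l = none → l.IsChain (· ≠ ·) := by
  intro l
  induction l with
  | nil => intro _; exact List.isChain_nil
  | cons a t ih =>
    match t with
    | [] => intro _; exact List.isChain_singleton a
    | b :: r =>
      intro h
      simp only [pvRemovePair] at h
      split at h
      · simp at h
      · next hab =>
        cases hr : pvRemovePair (b :: r) with
        | none => exact List.isChain_cons_cons.mpr ⟨hab, ih hr⟩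
        | some l'' => simp [hr] at h

theorem pvReduce_none (l : List Char) : pvRemovePair (pvReduce l) = none := by
  induction l using pvReduce.induct with
  | case1 l l' h ih => rw [pvReduce_some h]; exact ih
  | case2 l h => rw [pvReduce_of_none h]; exact h

-- on a pair-free string the stack just reverses it
theorem pvFoldl_chain : ∀ (l st : List Char), l.IsChain (· ≠ ·) →
    (∀ b ∈ st.head?, ∀ a ∈ l.head?, b ≠ a) →
    l.foldl pvStepA st = l.reverse ++ st := by
  intro l
  induction l with
  | nil => intro st _ _; simp
  | cons a t ih =>
    intro st hch hhd
    have hstep : pvStepA st a = a :: st := by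
      unfold pvStepA
      cases st with
      | nil => simp
      | cons x xs =>
        have hxa : x ≠ a := hhd x (by simp) a (by simp)
        simp [fun h : x = a => hxa h]
    rw [List.foldl_cons, hstep]
    rw [ih (a :: st) (List.isChain_cons.mp hch).2 ?_]
    · simp
    · intro b hb c hc
      simp at hb
      subst hb
      exact (List.isChain_cons.mp hch).1 c hc

-- ===== VERDICT (by name: the statement is the Claim_ definition above) =====
theorem solution_spec : Claim_equal_solution := by
  intro s _
  unfold Spec_solution solution solution_alt
  rw [pvReduce_foldl s.toList]
  set r := pvReduce s.toList with hr
  have hch := pvRemovePair_none_chain r (pvReduce_none s.toList)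
  rw [pvFoldl_chain r [] hch (by simp)]
  cases r <;> simp
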